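-- pv_equiv track=rewrite | github.com/EricBoittier/mmml | mmml/dcmnetc/dcmnet/dcmnet/pointcloudToMesh.py | has_boundary
-- ===== SOURCE A (Python) =====
-- def has_boundary(F):
--     from collections import Counter
--     edges = []
--     for a, b, c in F:
--         edges += [(a,b), (b,c), (c,a)]
--     canon = [tuple(sorted(e)) for e in edges]
--     cnt = Counter(canon)
--     return any(v == 1 for v in cnt.values())
-- ===== SOURCE B (Python) =====
-- def has_boundary(F):
--     es = sorted((min(x, y), max(x, y))
--                 for a, b, c in F
--                 for x, y in ((a, b), (b, c), (c, a)))
--     while es: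
--         head, rest = es[0], es[1:]
--         i = 0
--         while i < len(rest) and rest[i] == head:
--             i += 1
--         if i == 0:
--             return True
--         es = rest[i:]
--     return False
-- ===== Notes on version B (the rewrite author's own statement) =====
-- stated objective: alternative
-- what changed: Sort-then-scan instead of hash counting: B sorts the canonical edge list so equal edges become contiguous and detects a boundary by a run-length scan with early return, replacing A's Counter construction and final scan over all counts.
import Mathlib
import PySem

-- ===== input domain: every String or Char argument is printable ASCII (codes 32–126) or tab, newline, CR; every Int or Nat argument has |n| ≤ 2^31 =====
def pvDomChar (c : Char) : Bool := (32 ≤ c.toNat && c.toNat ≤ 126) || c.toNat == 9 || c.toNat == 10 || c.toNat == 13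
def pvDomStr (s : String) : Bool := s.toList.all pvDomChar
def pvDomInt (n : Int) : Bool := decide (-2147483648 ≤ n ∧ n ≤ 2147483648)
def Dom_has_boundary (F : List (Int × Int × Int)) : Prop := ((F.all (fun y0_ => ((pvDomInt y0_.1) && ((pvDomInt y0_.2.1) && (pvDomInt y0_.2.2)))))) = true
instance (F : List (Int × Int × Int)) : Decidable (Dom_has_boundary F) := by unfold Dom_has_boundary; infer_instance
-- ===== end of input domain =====

-- B replaces A's edge-list + Counter + count scan by sort-then-scan: sort the canonical
-- edges so equal edges are contiguous, then a run-length scan with early return (objective: alternative).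

-- ===== PORT A =====
-- tuple(sorted(e)) for a 2-tuple e; the catch-all branch is unreachable (sorted keeps length 2)
def canonA (e : Int × Int) : Int × Int :=
  match PySem.List.sorted [e.1, e.2] (fun z => z) false with
  | [p, q] => (p, q)
  | _ => e

def has_boundary (F : List (Int × Int × Int)) : Bool :=
  let edges := F.foldl
    (fun acc f => acc ++ [(f.1, f.2.1), (f.2.1, f.2.2), (f.2.2, f.1)]) []
  let canon := edges.map canonA
  let cnt := PySem.Dict.counter canon
  (PySem.Dict.values cnt).any (fun v => v == 1)

-- ===== PORT B =====
-- (min(x, y), max(x, y))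
def canonB (x y : Int) : Int × Int := (min x y, max x y)

-- the while loops of Source B: head/rest split, count the leading run of copies of head
-- ('takeWhile' is the inner 'while rest[i] == head' counter, 'dropWhile' is 'rest[i:]')
def scanRuns : List (Int × Int) → Bool
  | [] => false
  | e :: rest =>
    if (rest.takeWhile (fun x => x == e)).length == 0 then true
    else scanRuns (rest.dropWhile (fun x => x == e))
termination_by l => l.length
decreasing_by
  simp only [List.length_cons]
  exact Nat.lt_succ_of_le (List.length_dropWhile_le _ _)

-- sorted(tuples) is sorted with the lexicographic tuple key, i.e. PySem.List.sorted2 with fst/snd keys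
def has_boundary_alt (F : List (Int × Int × Int)) : Bool :=
  let es := PySem.List.sorted2
    (F.flatMap (fun f => [canonB f.1 f.2.1, canonB f.2.1 f.2.2, canonB f.2.2 f.1]))
    (fun e => e.1) (fun e => e.2) false
  scanRuns es

-- ===== PRECONDITION & SPEC =====
def Spec_has_boundary (F : List (Int × Int × Int)) (out : Bool) : Prop := out = has_boundary_alt F
instance (F : List (Int × Int × Int)) (out : Bool) : Decidable (Spec_has_boundary F out) := by unfold Spec_has_boundary; infer_instance

-- ===== CLAIM (what is proved, stated in full; the proofs are below) =====
def Claim_equal_has_boundary : Prop := ∀ (F : List (Int × Int × Int)), Dom_has_boundary F → Spec_has_boundary F (has_boundary F)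

-- ===== LEMMAS AND PROOFS =====

-- the comparison sorted2 uses for key (fst, snd): strict lexicographic order on pairs
def ltE (a b : Int × Int) : Bool :=
  decide (a.1 < b.1) || (!decide (b.1 < a.1) && decide (a.2 < b.2))

-- "a may come before b in the sorted output": not strictly after
def RleE (a b : Int × Int) : Prop := ltE b a = false

theorem ltE_asymm {a b : Int × Int} (h : ltE a b = true) : ltE b a = false := by
  obtain ⟨x1, x2⟩ := a; obtain ⟨y1, y2⟩ := b
  simp [ltE] at h ⊢; omega

theorem RleE_antisymm {a b : Int × Int} (h1 : RleE a b) (h2 : RleE b a) : a = b := by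
  obtain ⟨x1, x2⟩ := a; obtain ⟨y1, y2⟩ := b
  simp [RleE, ltE] at h1 h2 ⊢; omega

theorem ltE_RleE_trans {x y z : Int × Int} (h1 : ltE x y = true) (h2 : RleE y z) : RleE x z := by
  obtain ⟨x1, x2⟩ := x; obtain ⟨y1, y2⟩ := y; obtain ⟨z1, z2⟩ := z
  simp [RleE, ltE] at h1 h2 ⊢; omega

theorem insertBy_pairwise (x : Int × Int) (l : List (Int × Int))
    (h : l.Pairwise RleE) : (PySem.List.insertBy ltE x l).Pairwise RleE := by
  induction l with
  | nil => simp [PySem.List.insertBy]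
  | cons y ys ih =>
    rw [List.pairwise_cons] at h
    obtain ⟨hy, hys⟩ := h
    by_cases hlt : ltE x y = true
    · rw [show PySem.List.insertBy ltE x (y :: ys) = x :: y :: ys by
        simp [PySem.List.insertBy, hlt]]
      refine List.Pairwise.cons ?_ (List.Pairwise.cons hy hys)
      intro z hz
      rcases List.mem_cons.1 hz with rfl | hz
      · exact ltE_asymm hlt
      · exact ltE_RleE_trans hlt (hy z hz)
    · rw [show PySem.List.insertBy ltE x (y :: ys) = y :: PySem.List.insertBy ltE x ys by
        simp [PySem.List.insertBy, hlt]]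
      refine List.Pairwise.cons ?_ (ih hys)
      intro z hz
      rcases (PySem.List.mem_insertBy ltE x z ys).1 hz with rfl | hz
      · exact Bool.eq_false_iff.2 hlt
      · exact hy z hz

theorem sorted2_pairwise (xs : List (Int × Int)) :
    (PySem.List.sorted2 xs (fun e => e.1) (fun e => e.2) false).Pairwise RleE := by
  show (xs.foldl (fun acc x => PySem.List.insertBy _ x acc) []).Pairwise RleE
  have : ∀ (l : List (Int × Int)) (acc : List (Int × Int)), acc.Pairwise RleE →
      (l.foldl (fun acc x => PySem.List.insertBy
        (fun a b => decide (a.1 < b.1) || (!decide (b.1 < a.1) && decide (a.2 < b.2))) x acc) []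
        |>.Pairwise RleE) → True := fun _ _ _ _ => trivial
  -- generic foldl-preservation
  suffices h : ∀ (l acc : List (Int × Int)), acc.Pairwise RleE →
      (l.foldl (fun acc x => PySem.List.insertBy ltE x acc) acc).Pairwise RleE by
    exact h xs [] (by simp)
  intro l
  induction l with
  | nil => intro acc h; simpa using h
  | cons x t ih =>
    intro acc h
    exact ih _ (insertBy_pairwise x acc h)

theorem dropWhile_head_false {α : Type} {p : α → Bool} {l : List α} {x : α} {d' : List α}
    (h : l.dropWhile p = x :: d') : p x = false := by
  induction l with
  | nil => simp [List.dropWhile] at h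
  | cons a t ih =>
    by_cases hp : p a = true
    · rw [List.dropWhile_cons_of_pos hp] at h; exact ih h
    · rw [List.dropWhile_cons_of_neg hp] at h
      cases h; exact Bool.eq_false_iff.2 hp

-- the first element of a sorted list does not reappear after its leading run
theorem head_not_mem_dropWhile {e : Int × Int} {rest : List (Int × Int)}
    (h : (e :: rest).Pairwise RleE) :
    e ∉ rest.dropWhile (fun x => x == e) := by
  rw [List.pairwise_cons] at h
  obtain ⟨he, hrest⟩ := h
  intro hmem
  cases hd : rest.dropWhile (fun x => x == e) with
  | nil => simp [hd] at hmem
  | cons x0 d' =>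
    have hx0ne : x0 ≠ e := by
      have := dropWhile_head_false hd
      simpa using this
    have hx0mem : x0 ∈ rest :=
      (List.dropWhile_sublist (fun x => x == e)).subset
        (by rw [hd]; exact List.mem_cons_self ..)
    have hRex0 : RleE e x0 := he x0 hx0mem
    have hlt : ltE e x0 = true := by
      by_contra hc
      exact hx0ne (RleE_antisymm (Bool.eq_false_iff.2 hc) hRex0)
    rw [hd] at hmem
    rcases List.mem_cons.1 hmem with rfl | hmem
    · exact hx0ne rfl
    · -- e ∈ d'; Pairwise of the dropWhile sublist gives RleE x0 e
      have hdp : (x0 :: d').Pairwise RleE := by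
        have : (rest.dropWhile (fun x => x == e)).Pairwise RleE :=
          hrest.sublist (List.dropWhile_sublist _)
        rwa [hd] at this
      rw [List.pairwise_cons] at hdp
      have : RleE x0 e := hdp.1 e hmem
      rw [RleE] at this
      rw [this] at hlt
      exact Bool.false_ne_true hlt

theorem run_iff (e : Int × Int) (rest : List (Int × Int))
    (h : (e :: rest).Pairwise RleE) :
    (∃ b, (e :: rest).count b = 1) ↔
      ((rest.takeWhile (fun x => x == e)).length = 0 ∨
       ∃ b, (rest.dropWhile (fun x => x == e)).count b = 1) := by
  have hsplit : rest = rest.takeWhile (fun x => x == e) ++ rest.dropWhile (fun x => x == e) :=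
    (List.takeWhile_append_dropWhile).symm
  set t := rest.takeWhile (fun x => x == e) with hT
  set d := rest.dropWhile (fun x => x == e) with hD
  have htall : ∀ x ∈ t, x = e := by
    intro x hx
    have := List.mem_takeWhile_imp hx
    simpa using this
  have hed : e ∉ d := head_not_mem_dropWhile h
  have hce : (e :: rest).count e = 1 + t.length := by
    rw [List.count_cons_self, hsplit, List.count_append]
    have h1 : t.count e = t.length := List.count_eq_length.2 (fun x hx => ((htall x hx) ▸ rfl))
    have h2 : d.count e = 0 := List.count_eq_zero.2 hed
    omega
  have hcb : ∀ b, b ≠ e → (e :: rest).count b = d.count b := by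
    intro b hb
    rw [List.count_cons, hsplit, List.count_append]
    have h1 : t.count b = 0 := List.count_eq_zero.2 (fun hx => hb (htall b hx))
    simp [h1, Ne.symm hb]
  constructor
  · rintro ⟨b, hb⟩
    by_cases hbe : b = e
    · subst hbe; rw [hce] at hb; left; omega
    · right; exact ⟨b, (hcb b hbe) ▸ hb⟩
  · rintro (h0 | ⟨b, hb⟩)
    · exact ⟨e, by rw [hce]; omega⟩
    · have hbne : b ≠ e := by
        intro hbe; subst hbe
        have : d.count b = 0 := List.count_eq_zero.2 hed
        omega
      exact ⟨b, (hcb b hbne).symm ▸ hb⟩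

theorem scan_iff (l : List (Int × Int)) (h : l.Pairwise RleE) :
    scanRuns l = true ↔ ∃ b, l.count b = 1 := by
  induction l using scanRuns.induct with
  | case1 => simp [scanRuns]
  | case2 e rest ht =>
    have h0 : (rest.takeWhile (fun x => x == e)).length = 0 := by simpa using ht
    rw [show scanRuns (e :: rest) = true by rw [scanRuns]; simp [ht]]
    exact (iff_of_true rfl ((run_iff e rest h).2 (Or.inl h0)))
  | case3 e rest ht ih =>
    have hpd : (rest.dropWhile (fun x => x == e)).Pairwise RleE :=
      ((List.pairwise_cons.1 h).2).sublist (List.dropWhile_sublist _)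
    have hne : (rest.takeWhile (fun x => x == e)).length ≠ 0 := by simpa using ht
    rw [show scanRuns (e :: rest) = scanRuns (rest.dropWhile (fun x => x == e)) by
      rw [scanRuns]; simp [ht]]
    rw [ih hpd, run_iff e rest h]
    simp [hne]

-- ===== A characterised =====
def edges3 (f : Int × Int × Int) : List (Int × Int) :=
  [canonB f.1 f.2.1, canonB f.2.1 f.2.2, canonB f.2.2 f.1]

theorem sorted_pair (x y : Int) :
    PySem.List.sorted [x, y] (fun z => z) false = if x ≤ y then [x, y] else [y, x] := by
  by_cases h : x ≤ y <;> simp [PySem.List.sorted, PySem.List.insertBy, h]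

theorem canonA_eq (e : Int × Int) : canonA e = canonB e.1 e.2 := by
  obtain ⟨x, y⟩ := e
  by_cases h : x ≤ y <;>
    simp [canonA, canonB, sorted_pair, h, min_def, max_def]

theorem a_iff (F : List (Int × Int × Int)) :
    has_boundary F = true ↔ ∃ a, (F.flatMap edges3).count a = 1 := by
  unfold has_boundary
  have hed : F.foldl
      (fun acc f => acc ++ [(f.1, f.2.1), (f.2.1, f.2.2), (f.2.2, f.1)]) [] =
      F.flatMap (fun f => [(f.1, f.2.1), (f.2.1, f.2.2), (f.2.2, f.1)]) := by
    simpa using PySem.List.foldl_append_eq_flatMap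
      (fun f : Int × Int × Int => [(f.1, f.2.1), (f.2.1, f.2.2), (f.2.2, f.1)]) F []
  have hmap : (F.flatMap
      (fun f => [(f.1, f.2.1), (f.2.1, f.2.2), (f.2.2, f.1)])).map canonA =
      F.flatMap edges3 := by
    simp [List.map_flatMap, canonA_eq]
    rfl
  simp only [hed, hmap, PySem.Dict.values, PySem.Dict.items_counter, List.map_map]
  rw [List.any_eq_true]
  constructor
  · rintro ⟨v, hv, hbeq⟩
    obtain ⟨a, _, rfl⟩ := List.mem_map.1 hv
    refine ⟨a, ?_⟩
    have h' : ((F.flatMap edges3).count a : Int) = 1 := by simpa using hbeq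
    exact_mod_cast h'
  · rintro ⟨a, ha⟩
    have hmem : a ∈ F.flatMap edges3 := by
      rw [← List.count_pos_iff]; omega
    exact ⟨((F.flatMap edges3).count a : Int),
      List.mem_map.2 ⟨a, by simpa [PySem.Set.mem_ofList] using hmem, rfl⟩, by simp [ha]⟩

theorem alt_iff (F : List (Int × Int × Int)) :
    has_boundary_alt F = true ↔ ∃ a, (F.flatMap edges3).count a = 1 := by
  unfold has_boundary_alt
  have hperm : (PySem.List.sorted2 (F.flatMap edges3)
      (fun e => e.1) (fun e => e.2) false).Perm (F.flatMap edges3) :=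
    PySem.List.sorted2_perm _ _ _ _
  rw [show (F.flatMap (fun f => [canonB f.1 f.2.1, canonB f.2.1 f.2.2, canonB f.2.2 f.1])) =
      F.flatMap edges3 from rfl]
  rw [scan_iff _ (sorted2_pairwise _)]
  constructor <;> rintro ⟨a, ha⟩ <;> refine ⟨a, ?_⟩
  · rw [← hperm.count_eq]; exact ha
  · rw [hperm.count_eq]; exact ha

-- ===== VERDICT (by name: the statement is the Claim_ definition above) =====
theorem has_boundary_spec : Claim_equal_has_boundary := by
  intro F _
  unfold Spec_has_boundary
  rw [Bool.eq_iff_iff, a_iff, alt_iff]
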